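-- pv_equiv track=rewrite | github.com/szymonkujawski/pp1 | 03-ControlStructures/40.py | f
-- ===== SOURCE A (Python) =====
-- def f(number):
--     one_count = 0
--     two_count = 0
--     three_count = 0
--     four_count = 0
--     five_count = 0
--     six_count = 0
--     seven_count = 0
--     eight_count = 0
--     nine_count = 0
--     z = 0
--     sum_of_all = 0
--
--     while number > 0:
--         z = number % 10
--         if z==1:
--             one_count += 1
--         elif z==2:
--             two_count += 1
--         elif z==3:
--             three_count += 1
--         elif z==4:
--             four_count += 1
--         elif z==5:
--             five_count += 1
--         elif z==6:
--             six_count += 1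
--         elif z==7:
--             seven_count += 1
--         elif z==8:
--             eight_count += 1
--         elif z==9:
--             nine_count += 1
--         number //= 10
--
--     if one_count>=2:
--         sum_of_all += one_count*1
--     if two_count>=2:
--         sum_of_all += two_count*2
--     if three_count>=2:
--         sum_of_all += three_count*3
--     if four_count>=2:
--         sum_of_all += four_count*4
--     if five_count>=2:
--         sum_of_all += five_count*5
--     if six_count>=2:
--         sum_of_all += six_count*6
--     if seven_count>=2:
--         sum_of_all += seven_count*7
--     if eight_count>=2:
--         sum_of_all += eight_count*8
--     if nine_count>=2:
--         sum_of_all += nine_count*9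
--
--     return sum_of_all
-- ===== SOURCE B (Python) =====
-- def f(number):
--     def count_digit(d, n):
--         c = 0
--         while n > 0:
--             if n % 10 == d:
--                 c += 1
--             n //= 10
--         return c
--
--     total = 0
--     for d in range(1, 10):
--         c = count_digit(d, number)
--         if c >= 2:
--             total += d * c
--     return total
-- ===== Notes on version B (the rewrite author's own statement) =====
-- stated objective: simpler
-- what changed: Replaces the single pass with nine named counters and two hardcoded nine-way if/elif cascades by a small count_digit helper run once per digit 1-9, summing d*count when count >= 2 in one generic loop.
import Mathlib
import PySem

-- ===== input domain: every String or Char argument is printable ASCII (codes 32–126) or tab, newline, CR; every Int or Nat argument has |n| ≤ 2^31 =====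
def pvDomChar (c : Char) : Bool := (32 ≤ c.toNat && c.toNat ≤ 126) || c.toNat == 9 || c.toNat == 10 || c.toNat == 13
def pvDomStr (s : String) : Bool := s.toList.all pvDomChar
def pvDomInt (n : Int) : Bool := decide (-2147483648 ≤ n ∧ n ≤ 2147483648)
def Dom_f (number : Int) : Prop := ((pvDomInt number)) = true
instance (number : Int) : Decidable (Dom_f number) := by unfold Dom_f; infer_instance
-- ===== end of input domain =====

-- B replaces nine named counters and two nine-way if/elif cascades by a per-digit
-- counting helper and one generic loop over the digits 1..9 (objective: simpler).

theorem pvDiv10_toNat_lt (n : Int) (h : 0 < n) :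
    (PySem.Int.floordiv n 10).toNat < n.toNat := by
  rw [PySem.Int.floordiv_eq_ediv_of_pos (by norm_num)]
  omega

-- ===== PORT A =====
-- A's while-loop: nine digit counters updated through the if/elif cascade.
def fLoopA (n c1 c2 c3 c4 c5 c6 c7 c8 c9 : Int) :
    Int × Int × Int × Int × Int × Int × Int × Int × Int :=
  if h : 0 < n then
    let z := PySem.Int.mod n 10
    let n' := PySem.Int.floordiv n 10
    if z = 1 then fLoopA n' (c1+1) c2 c3 c4 c5 c6 c7 c8 c9
    else if z = 2 then fLoopA n' c1 (c2+1) c3 c4 c5 c6 c7 c8 c9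
    else if z = 3 then fLoopA n' c1 c2 (c3+1) c4 c5 c6 c7 c8 c9
    else if z = 4 then fLoopA n' c1 c2 c3 (c4+1) c5 c6 c7 c8 c9
    else if z = 5 then fLoopA n' c1 c2 c3 c4 (c5+1) c6 c7 c8 c9
    else if z = 6 then fLoopA n' c1 c2 c3 c4 c5 (c6+1) c7 c8 c9
    else if z = 7 then fLoopA n' c1 c2 c3 c4 c5 c6 (c7+1) c8 c9
    else if z = 8 then fLoopA n' c1 c2 c3 c4 c5 c6 c7 (c8+1) c9
    else if z = 9 then fLoopA n' c1 c2 c3 c4 c5 c6 c7 c8 (c9+1)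
    else fLoopA n' c1 c2 c3 c4 c5 c6 c7 c8 c9
  else (c1, c2, c3, c4, c5, c6, c7, c8, c9)
termination_by n.toNat
decreasing_by all_goals exact pvDiv10_toNat_lt n h

-- A's nine final `if count >= 2` additions, in source order.
def fSumA (c1 c2 c3 c4 c5 c6 c7 c8 c9 : Int) : Int :=
  let s0 : Int := 0
  let s1 := if c1 ≥ 2 then s0 + c1 * 1 else s0
  let s2 := if c2 ≥ 2 then s1 + c2 * 2 else s1
  let s3 := if c3 ≥ 2 then s2 + c3 * 3 else s2
  let s4 := if c4 ≥ 2 then s3 + c4 * 4 else s3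
  let s5 := if c5 ≥ 2 then s4 + c5 * 5 else s4
  let s6 := if c6 ≥ 2 then s5 + c6 * 6 else s5
  let s7 := if c7 ≥ 2 then s6 + c7 * 7 else s6
  let s8 := if c8 ≥ 2 then s7 + c8 * 8 else s7
  let s9 := if c9 ≥ 2 then s8 + c9 * 9 else s8
  s9

def f (number : Int) : Int :=
  let cs := fLoopA number 0 0 0 0 0 0 0 0 0
  fSumA cs.1 cs.2.1 cs.2.2.1 cs.2.2.2.1 cs.2.2.2.2.1 cs.2.2.2.2.2.1
    cs.2.2.2.2.2.2.1 cs.2.2.2.2.2.2.2.1 cs.2.2.2.2.2.2.2.2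

-- ===== PORT B =====
-- Source B's count_digit: one pass counting occurrences of digit d in n.
def countDigit (d n c : Int) : Int :=
  if h : 0 < n then
    countDigit d (PySem.Int.floordiv n 10)
      (if PySem.Int.mod n 10 = d then c + 1 else c)
  else c
termination_by n.toNat
decreasing_by exact pvDiv10_toNat_lt n h

-- Source B's loop body over d in range(1, 10).
def fStepB (number total d : Int) : Int :=
  let c := countDigit d number 0
  if c ≥ 2 then total + d * c else total

def f_alt (number : Int) : Int :=
  (PySem.List.pyRange 1 10 1).foldl (fStepB number) 0

-- ===== PRECONDITION & SPEC =====
def Spec_f (number : Int) (out : Int) : Prop := out = f_alt number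
instance (number : Int) (out : Int) : Decidable (Spec_f number out) := by unfold Spec_f; infer_instance

-- ===== CLAIM (what is proved, stated in full; the proofs are below) =====
def Claim_equal_f : Prop := ∀ (number : Int), Dom_f number → Spec_f number (f number)

-- ===== LEMMAS AND PROOFS =====

theorem countDigit_shift (d : Int) : ∀ (k : Nat) (n c : Int), n.toNat = k →
    countDigit d n c = c + countDigit d n 0 := by
  intro k
  induction k using Nat.strong_induction_on with
  | _ k ih =>
    intro n c hk
    by_cases h : 0 < n
    · have hlt := hk ▸ pvDiv10_toNat_lt n h
      conv_lhs => rw [countDigit]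
      conv_rhs => rw [countDigit]
      simp only [h, dif_pos]
      rw [ih _ hlt _ (if PySem.Int.mod n 10 = d then c + 1 else c) rfl,
          ih _ hlt _ (if PySem.Int.mod n 10 = d then (0:Int) + 1 else 0) rfl]
      split_ifs <;> ring
    · conv_lhs => rw [countDigit]
      conv_rhs => rw [countDigit]
      simp [h]

theorem countDigit_step (d n : Int) (h : 0 < n) :
    countDigit d n 0 = (if PySem.Int.mod n 10 = d then 1 else 0)
      + countDigit d (PySem.Int.floordiv n 10) 0 := by
  conv_lhs => rw [countDigit]
  simp only [h, dif_pos]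
  rw [countDigit_shift d (PySem.Int.floordiv n 10).toNat _
      (if PySem.Int.mod n 10 = d then (0:Int) + 1 else 0) rfl]
  split_ifs <;> ring

theorem countDigit_stop (d n : Int) (h : ¬ 0 < n) : countDigit d n 0 = 0 := by
  rw [countDigit]; simp [h]

theorem fLoopA_eq : ∀ (k : Nat) (n c1 c2 c3 c4 c5 c6 c7 c8 c9 : Int), n.toNat = k →
    fLoopA n c1 c2 c3 c4 c5 c6 c7 c8 c9 =
      (c1 + countDigit 1 n 0, c2 + countDigit 2 n 0, c3 + countDigit 3 n 0,
       c4 + countDigit 4 n 0, c5 + countDigit 5 n 0, c6 + countDigit 6 n 0,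
       c7 + countDigit 7 n 0, c8 + countDigit 8 n 0, c9 + countDigit 9 n 0) := by
  intro k
  induction k using Nat.strong_induction_on with
  | _ k ih =>
    intro n c1 c2 c3 c4 c5 c6 c7 c8 c9 hk
    rw [fLoopA]
    by_cases h : 0 < n
    · have hlt := hk ▸ pvDiv10_toNat_lt n h
      have ih' := fun a1 a2 a3 a4 a5 a6 a7 a8 a9 =>
        ih (PySem.Int.floordiv n 10).toNat hlt (PySem.Int.floordiv n 10)
          a1 a2 a3 a4 a5 a6 a7 a8 a9 rfl
      simp only [h, dif_pos]
      split_ifs with h1 h2 h3 h4 h5 h6 h7 h8 h9 <;>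
        rw [ih'] <;>
        simp only [countDigit_step _ n h, *, Prod.mk.injEq] <;>
        norm_num <;> ring_nf
    · simp only [h, dif_neg, not_false_iff, countDigit_stop _ _ h]
      norm_num

theorem pyRange_1_10 : PySem.List.pyRange 1 10 1 = [1,2,3,4,5,6,7,8,9] := by decide

-- ===== VERDICT (by name: the statement is the Claim_ definition above) =====
theorem f_spec : Claim_equal_f := by
  unfold Claim_equal_f Spec_f
  intro number _
  rw [f, f_alt, pyRange_1_10,
      fLoopA_eq number.toNat number 0 0 0 0 0 0 0 0 0 rfl]
  simp only [List.foldl, fStepB, fSumA, zero_add, mul_comm]
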